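-- pv_equiv track=rewrite | github.com/maxwell-black/blackslaw-dictionary | scripts/tier_a_recovery.py | extract_entry_body
-- ===== SOURCE A (Python) =====
-- def is_headword_line(line, min_len=3):
--     """Check if a line looks like a dictionary headword (all caps, standalone)."""
--     stripped = line.strip()
--     if len(stripped) < min_len:
--         return False
--     # Must be mostly uppercase letters
--     alpha_chars = [c for c in stripped if c.isalpha()]
--     if not alpha_chars:
--         return False
--     upper_ratio = sum(1 for c in alpha_chars if c.isupper()) / len(alpha_chars)
--     if upper_ratio < 0.85:
--         return False
--     # Must start with a capital letter
--     if not stripped[0].isupper():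
--         return False
--     # Should not be too long (headwords are typically < 60 chars)
--     if len(stripped) > 70:
--         return False
--     return True
--
-- def extract_entry_body(page_text, term, start_line_idx, lines):
--     """Extract the entry body starting from the headword line.
--
--     Continues until the next headword-like line or end of page.
--     Returns the extracted body text.
--     """
--     body_lines = []
--     term_upper = term.upper()
--
--     # Start from the headword line itself
--     first_line = lines[start_line_idx].strip()
--
--     # Remove the headword from the start of the first line
--     if first_line.upper().startswith(term_upper):
--         remainder = first_line[len(term_upper):].lstrip(" .,;:")
--         if remainder:
--             body_lines.append(remainder)
--
--     # Continue with subsequent lines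
--     for i in range(start_line_idx + 1, len(lines)):
--         line = lines[i]
--         stripped = line.strip()
--
--         if not stripped:
--             # Blank line — could be paragraph break or entry separator
--             # Keep it for now, we'll clean up later
--             body_lines.append("")
--             continue
--
--         # Check if this line starts a new headword entry
--         if is_headword_line(stripped) and stripped.upper() != term_upper:
--             # This looks like a new entry — stop here
--             break
--
--         body_lines.append(stripped)
--
--     # Clean up: remove trailing blank lines
--     while body_lines and not body_lines[-1].strip():
--         body_lines.pop()
--
--     return "\n".join(body_lines)
-- ===== SOURCE B (Python) =====
-- def is_headword_line(line, min_len=3):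
--     """Check if a line looks like a dictionary headword (all caps, standalone)."""
--     stripped = line.strip()
--     if len(stripped) < min_len:
--         return False
--     alpha_chars = [c for c in stripped if c.isalpha()]
--     if not alpha_chars:
--         return False
--     upper_ratio = sum(1 for c in alpha_chars if c.isupper()) / len(alpha_chars)
--     if upper_ratio < 0.85:
--         return False
--     if not stripped[0].isupper():
--         return False
--     if len(stripped) > 70:
--         return False
--     return True
--
-- def extract_entry_body(page_text, term, start_line_idx, lines):
--     """Backward single pass: collect body lines right-to-left in reverse order.
--
--     A headword boundary resets the accumulator to None, which discards
--     everything after it; blank lines only attach when body text follows,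
--     so trailing blanks never appear and no trim phase is needed.
--     """
--     term_upper = term.upper()
--     rev = None  # body lines in reverse order, or None if no body text yet
--     for i in reversed(range(start_line_idx + 1, len(lines))):
--         s = lines[i].strip()
--         if not s:
--             if rev is not None:
--                 rev.append("")
--         elif is_headword_line(s) and s.upper() != term_upper:
--             rev = None
--         elif rev is None:
--             rev = [s]
--         else:
--             rev.append(s)
--     first_line = lines[start_line_idx].strip()
--     if first_line.upper().startswith(term_upper):
--         remainder = first_line[len(term_upper):].lstrip(" .,;:")
--         if remainder:
--             if rev is None:
--                 return remainder
--             rev.append(remainder)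
--     return "" if rev is None else "\n".join(reversed(rev))
-- ===== Notes on version B (the rewrite author's own statement) =====
-- stated objective: alternative
-- what changed: A collects body lines forward with a mid-loop break on the next headword and then pops trailing blanks before joining; B makes a single backward pass with an Option accumulator that a headword boundary resets to None and to which blanks attach only when body text already follows, so the entry body falls out with no break, no forward boundary search and no trim phase.
import Mathlib
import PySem

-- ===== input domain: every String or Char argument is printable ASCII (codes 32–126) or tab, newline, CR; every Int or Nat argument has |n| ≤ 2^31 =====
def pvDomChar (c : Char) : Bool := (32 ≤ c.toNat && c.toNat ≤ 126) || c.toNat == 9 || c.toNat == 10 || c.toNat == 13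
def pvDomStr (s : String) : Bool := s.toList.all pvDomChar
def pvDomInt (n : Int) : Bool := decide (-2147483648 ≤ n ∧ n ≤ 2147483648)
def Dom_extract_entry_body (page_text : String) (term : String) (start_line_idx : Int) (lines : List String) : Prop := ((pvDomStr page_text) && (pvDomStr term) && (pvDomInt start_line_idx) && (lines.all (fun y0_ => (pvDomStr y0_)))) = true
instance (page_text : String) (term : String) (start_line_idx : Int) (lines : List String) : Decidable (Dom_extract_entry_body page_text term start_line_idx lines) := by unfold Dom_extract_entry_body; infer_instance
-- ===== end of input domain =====

-- B replaces A's forward collect-then-break loop plus trailing-blank pop phase by a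
-- single BACKWARD pass with an Option accumulator that a headword boundary resets,
-- building the body string directly; objective: alternative (no speed claim).

-- ===== PORT A =====

-- shared module helper is_headword_line (both Pythons carry the identical helper);
-- the float test 'upper_ratio < 0.85' is ported as the exact rational comparison
-- 20·#upper < 17·#alpha, which agrees with CPython's float comparison for all
-- realistic line lengths (a mismatch would need ~10^15 alphabetic chars in one line)
def pv_is_headword_line (line : String) : Bool :=
  let stripped := (PySem.Str.strip line).toList
  if stripped.length < 3 then false
  else
    let alpha_chars := stripped.filter (fun c => PySem.Chars.isalpha c)
    if alpha_chars.length = 0 then false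
    else if 20 * (alpha_chars.filter (fun c => PySem.Chars.isupper c)).length
            < 17 * alpha_chars.length then false
    else if !(PySem.Chars.isupper (stripped.headD ' ')) then false
    else if stripped.length > 70 then false
    else true

-- 'is_headword_line(stripped) and stripped.upper() != term_upper' (the break test both Pythons write)
def pv_breaks (term_upper : String) (s : String) : Bool :=
  pv_is_headword_line s && (PySem.Str.upper s != term_upper)

-- remainder.lstrip(" .,;:"), exact per-character on ASCII
def pv_lstrip_punct (s : String) : String :=
  String.ofList (s.toList.dropWhile (fun c => c ∈ [' ', '.', ',', ';', ':']))

-- A's headword-line prefix of body_lines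
def pv_head_part (term_upper first_line : String) : List String :=
  if PySem.Str.startswith (PySem.Str.upper first_line) term_upper then
    let remainder := pv_lstrip_punct (PySem.Str.slice first_line (some (PySem.Str.len term_upper)) none)
    if remainder = "" then [] else [remainder]
  else []

-- A's 'for i in range(start_line_idx+1, len(lines))' loop with its mid-loop break
def pv_body_loop (tu : String) (lines : List String) : List Int → List String → List String
  | [], acc => acc
  | i :: rest, acc =>
    let stripped := PySem.Str.strip (PySem.List.pyGetD lines i "")
    if stripped = "" then pv_body_loop tu lines rest (acc ++ [""])
    else if pv_breaks tu stripped then acc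
    else pv_body_loop tu lines rest (acc ++ [stripped])

-- A's 'while body_lines and not body_lines[-1].strip(): body_lines.pop()'
def pv_trim (body : List String) : List String :=
  if h : body = [] then []
  else if PySem.Str.strip (body.getLast h) = "" then pv_trim body.dropLast
  else body
termination_by body.length
decreasing_by
  have : body.length ≠ 0 := fun hn => h (List.length_eq_zero_iff.mp hn)
  simp only [List.length_dropLast]; omega

def extract_entry_body (page_text : String) (term : String) (start_line_idx : Int) (lines : List String) : String :=
  let term_upper := PySem.Str.upper term
  let first_line := PySem.Str.strip (PySem.List.pyGetD lines start_line_idx "")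
  let body0 := pv_head_part term_upper first_line
  let body1 := pv_body_loop term_upper lines
      (PySem.List.pyRange (start_line_idx + 1) (lines.length : Int) 1) body0
  PySem.Str.join "\n" (pv_trim body1)

-- ===== PORT B =====

-- one step of B's backward loop body (rev is the reverse-order accumulator)
def pvb_step (tu : String) (lines : List String) (i : Int) (rev : Option (List String)) : Option (List String) :=
  let s := PySem.Str.strip (PySem.List.pyGetD lines i "")
  if s = "" then
    match rev with
    | none => none
    | some r => some (r ++ [""])
  else if pv_breaks tu s then none
  else
    match rev with
    | none => some [s]
    | some r => some (r ++ [s])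

def extract_entry_body_alt (page_text : String) (term : String) (start_line_idx : Int) (lines : List String) : String :=
  let term_upper := PySem.Str.upper term
  -- for i in reversed(range(start_line_idx + 1, len(lines))): …
  let rev : Option (List String) :=
    ((PySem.List.pyRange (start_line_idx + 1) (lines.length : Int) 1).reverse).foldl
      (fun r i => pvb_step term_upper lines i r) none
  let first_line := PySem.Str.strip (PySem.List.pyGetD lines start_line_idx "")
  -- the two trailing '"\n".join(reversed(rev))' returns are Python's fall-through final return
  if PySem.Str.startswith (PySem.Str.upper first_line) term_upper then
    let remainder := pv_lstrip_punct (PySem.Str.slice first_line (some (PySem.Str.len term_upper)) none)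
    if remainder ≠ "" then
      match rev with
      | none => remainder
      | some r => PySem.Str.join "\n" ((r ++ [remainder]).reverse)
    else match rev with | none => "" | some r => PySem.Str.join "\n" r.reverse
  else match rev with | none => "" | some r => PySem.Str.join "\n" r.reverse

-- ===== PRECONDITION & SPEC =====
-- Pre_ excludes exactly the inputs where Python's lines[start_line_idx] raises IndexError
def Pre_extract_entry_body (page_text : String) (term : String) (start_line_idx : Int) (lines : List String) : Prop :=
  PySem.Raise.InRange lines.length start_line_idx
instance (page_text : String) (term : String) (start_line_idx : Int) (lines : List String) : Decidable (Pre_extract_entry_body page_text term start_line_idx lines) := by unfold Pre_extract_entry_body; infer_instance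

def pvWitness_extract_entry_body : String × String × Int × List String :=
  ("", "CAT", 0, ["CAT. a pet", "more text", "", "DOG"])

def Spec_extract_entry_body (page_text : String) (term : String) (start_line_idx : Int) (lines : List String) (out : String) : Prop := out = extract_entry_body_alt page_text term start_line_idx lines
instance (page_text : String) (term : String) (start_line_idx : Int) (lines : List String) (out : String) : Decidable (Spec_extract_entry_body page_text term start_line_idx lines out) := by unfold Spec_extract_entry_body; infer_instance

-- ===== CLAIM (what is proved, stated in full; the proofs are below) =====
def Claim_equal_extract_entry_body : Prop := ∀ (page_text : String) (term : String) (start_line_idx : Int) (lines : List String), Dom_extract_entry_body page_text term start_line_idx lines → Pre_extract_entry_body page_text term start_line_idx lines → Spec_extract_entry_body page_text term start_line_idx lines (extract_entry_body page_text term start_line_idx lines)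

-- ===== LEMMAS AND PROOFS =====

theorem pv_headword_empty : pv_is_headword_line "" = false := by decide

theorem pv_breaks_empty (tu : String) : pv_breaks tu "" = false := by
  simp [pv_breaks, pv_headword_empty]

-- A's break-loop appends the stripped lines up to the first break, in one block
theorem pv_body_loop_eq (tu : String) (lines : List String) (is : List Int) (acc : List String) :
    pv_body_loop tu lines is acc =
      acc ++ ((is.map (fun i => PySem.Str.strip (PySem.List.pyGetD lines i ""))).take
              ((is.map (fun i => PySem.Str.strip (PySem.List.pyGetD lines i ""))).findIdx
                (fun s => pv_breaks tu s))) := by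
  induction is generalizing acc with
  | nil => simp [pv_body_loop]
  | cons i rest ih =>
    simp only [pv_body_loop, List.map_cons, List.findIdx_cons]
    by_cases hb : pv_breaks tu (PySem.Str.strip (PySem.List.pyGetD lines i "")) = true
    · have hne : ¬ (PySem.Str.strip (PySem.List.pyGetD lines i "") = "") := by
        intro h; rw [h, pv_breaks_empty] at hb; exact Bool.false_ne_true hb
      simp [hne, hb]
    · rw [Bool.not_eq_true] at hb
      by_cases he : PySem.Str.strip (PySem.List.pyGetD lines i "") = ""
      · simp [he, ih, pv_breaks_empty]
      · simp [he, hb, ih]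

-- canonical form of A's while-pop: drop the trailing blank run
def pv_trimC (l : List String) : List String :=
  (l.reverse.dropWhile (fun s => PySem.Str.strip s == "")).reverse

theorem pv_trim_eq_trimC (l : List String) : pv_trim l = pv_trimC l := by
  induction l using List.reverseRecOn with
  | nil => simp [pv_trim, pv_trimC]
  | append_singleton ys x ih =>
    rw [pv_trim]
    have hne : ys ++ [x] ≠ [] := by simp
    have hlast : (ys ++ [x]).getLast hne = x := List.getLast_append_singleton ys
    simp only [hne, dite_false, hlast, pv_trimC, List.reverse_append, List.reverse_singleton,
      List.singleton_append, List.dropWhile_cons]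
    by_cases hx : PySem.Str.strip x = ""
    · simp [hx, ih, pv_trimC]
    · simp [hx]

-- cons form of the trailing-blank trim
theorem pv_trimC_cons (s : String) (X : List String) :
    pv_trimC (s :: X) =
      if pv_trimC X = [] then (if PySem.Str.strip s = "" then [] else [s])
      else s :: pv_trimC X := by
  by_cases h0 : (X.reverse.dropWhile (fun t => PySem.Str.strip t == "")).isEmpty
  · have hX : pv_trimC X = [] := by simp [pv_trimC, List.isEmpty_iff.mp h0]
    rw [if_pos hX]
    simp only [pv_trimC, List.reverse_cons, List.dropWhile_append, h0, if_true]
    by_cases hs : PySem.Str.strip s = "" <;> simp [hs]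
  · have hX : pv_trimC X ≠ [] := by
      simp only [Bool.not_eq_true, List.isEmpty_eq_false_iff] at h0
      simp [pv_trimC, h0]
    rw [if_neg hX]
    simp only [Bool.not_eq_true] at h0
    simp only [pv_trimC, List.reverse_cons, List.dropWhile_append, h0]
    simp

-- B's loop step, phrased on the already-stripped line
theorem pv_strip_empty : PySem.Str.strip "" = "" := rfl

def pvG (tu : String) (s : String) (t : Option (List String)) : Option (List String) :=
  if s = "" then
    match t with
    | none => none
    | some r => some (r ++ [""])
  else if pv_breaks tu s then none
  else
    match t with
    | none => some [s]
    | some r => some (r ++ [s])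

theorem pvb_step_eq (tu : String) (lines : List String) (i : Int) (t : Option (List String)) :
    pvb_step tu lines i t = pvG tu (PySem.Str.strip (PySem.List.pyGetD lines i "")) t := rfl

-- B's accumulator, read off A's collected body: the reversed body, or none if empty
def pvOptRev (l : List String) : Option (List String) :=
  if l = [] then none else some l.reverse

theorem pv_join_singleton (a : String) : PySem.Str.join "\n" [a] = a := by
  apply String.toList_injective
  simp [PySem.Str.toList_join, PySem.Chars.join_singleton]

-- all-blank characterisation of strip
theorem pv_strip_nil_iff (cs : List Char) :
    PySem.Chars.strip cs = [] ↔ ∀ c ∈ cs, PySem.Chars.isspace c = true := by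
  simp only [PySem.Chars.strip, PySem.Chars.rstrip, PySem.Chars.lstrip,
    List.reverse_eq_nil_iff, List.dropWhile_eq_nil_iff, List.mem_reverse]
  constructor
  · intro h c hc
    rw [← List.takeWhile_append_dropWhile (p := PySem.Chars.isspace) (l := cs)] at hc
    rcases List.mem_append.mp hc with h1 | h2
    · exact List.mem_takeWhile_imp h1
    · exact h c h2
  · intro h x hx
    exact h x ((List.dropWhile_suffix _).subset hx)

-- the last character of a stripped string is not whitespace
theorem pv_strip_getLast?_not_space (cs : List Char) (c : Char)
    (h : (PySem.Chars.strip cs).getLast? = some c) : PySem.Chars.isspace c = false := by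
  have hh := List.head?_dropWhile_not PySem.Chars.isspace ((PySem.Chars.lstrip cs).reverse)
  simp only [PySem.Chars.strip, PySem.Chars.rstrip, List.getLast?_reverse] at h
  rw [h] at hh
  exact hh

-- a nonempty list whose last character is not whitespace does not strip to empty
theorem pv_strip_ne_nil_of_last (cs : List Char) (c : Char)
    (h : cs.getLast? = some c) (hc : PySem.Chars.isspace c = false) :
    PySem.Chars.strip cs ≠ [] := by
  intro hn
  rw [(pv_strip_nil_iff cs).mp hn c (List.mem_of_getLast? h)] at hc
  exact absurd hc (by decide)

-- strip is a vacuity test on already-stripped strings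
theorem pv_strip_strip_iff (raw : String) :
    PySem.Str.strip (PySem.Str.strip raw) = "" ↔ PySem.Str.strip raw = "" := by
  constructor
  · intro h
    by_contra hne
    have hl : (PySem.Str.strip raw).toList ≠ [] := fun hn => hne (String.toList_eq_nil_iff.mp hn)
    obtain ⟨c, hc⟩ := Option.isSome_iff_exists.mp (List.getLast?_isSome.mpr hl)
    have hcs : (PySem.Chars.strip raw.toList).getLast? = some c := by
      rw [← PySem.Str.toList_strip]; exact hc
    have hnsp := pv_strip_getLast?_not_space raw.toList c hcs
    have : PySem.Chars.strip (PySem.Str.strip raw).toList = [] := by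
      rw [← PySem.Str.toList_strip, h]; rfl
    exact pv_strip_ne_nil_of_last _ c hc hnsp this
  · intro h; rw [h]; rfl

-- the remainder A keeps on the headword line never strips to empty
theorem pv_head_remainder_not_blank (raw : String) (k : Int)
    (hr : pv_lstrip_punct (PySem.Str.slice (PySem.Str.strip raw) (some k) none) ≠ "") :
    PySem.Str.strip (pv_lstrip_punct (PySem.Str.slice (PySem.Str.strip raw) (some k) none)) ≠ "" := by
  set first := PySem.Str.strip raw with hfirst
  set r := pv_lstrip_punct (PySem.Str.slice first (some k) none) with hrdef
  have hrl : r.toList =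
      ((PySem.List.slice first.toList (some k) none).dropWhile (fun c => decide (c ∈ [' ', '.', ',', ';', ':']))) := by
    rw [hrdef]
    simp [pv_lstrip_punct, PySem.Str.toList_slice, PySem.Chars.slice_eq_listSlice, String.toList_ofList]
  have hsuf : r.toList <:+ first.toList := by
    rw [hrl]
    exact (List.dropWhile_suffix _).trans (by rw [PySem.List.slice_some_none]; exact List.drop_suffix _ _)
  have hrne : r.toList ≠ [] := fun hn => hr (String.toList_eq_nil_iff.mp hn)
  obtain ⟨c, hc⟩ := Option.isSome_iff_exists.mp (List.getLast?_isSome.mpr hrne)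
  have hlastfirst : first.toList.getLast? = some c := by
    obtain ⟨t, ht⟩ := hsuf
    rw [← ht, List.getLast?_append_of_ne_nil t hrne, hc]
  have hnsp : PySem.Chars.isspace c = false := by
    apply pv_strip_getLast?_not_space raw.toList c
    rw [← PySem.Str.toList_strip, ← hfirst]; exact hlastfirst
  intro hn
  have : PySem.Chars.strip r.toList = [] := by
    rw [← PySem.Str.toList_strip, hn]; rfl
  exact pv_strip_ne_nil_of_last _ c hc hnsp this

-- THE CENTRAL LEMMA: B's backward fold computes A's trimmed forward collection
theorem pv_foldr_g (tu : String) (strips : List String)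
    (h : ∀ s ∈ strips, (PySem.Str.strip s = "" ↔ s = "")) :
    strips.foldr (pvG tu) none =
      pvOptRev (pv_trimC (strips.take (strips.findIdx (fun s => pv_breaks tu s)))) := by
  induction strips with
  | nil => simp [pvOptRev, pv_trimC]
  | cons s rest ih =>
    have hs := h s List.mem_cons_self
    have ihr := ih (fun x hx => h x (List.mem_cons_of_mem s hx))
    simp only [List.foldr_cons, List.findIdx_cons]
    by_cases hb : pv_breaks tu s = true
    · have hsne : s ≠ "" := by intro hn; rw [hn, pv_breaks_empty] at hb; exact Bool.false_ne_true hb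
      simp [pvG, hsne, hb, pvOptRev, pv_trimC]
    · rw [Bool.not_eq_true] at hb
      rw [ihr, hb]
      simp only [cond_false, List.take_succ_cons, pv_trimC_cons]
      by_cases hT : pv_trimC (rest.take (rest.findIdx fun s => pv_breaks tu s)) = []
      · rw [if_pos hT]
        by_cases hse : s = ""
        · subst hse
          simp [pvG, pvOptRev, hT, pv_strip_empty]
        · have hss : PySem.Str.strip s ≠ "" := fun hn => hse (hs.mp hn)
          simp [pvG, hse, hb, hss, pvOptRev, hT]
      · rw [if_neg hT]
        by_cases hse : s = ""
        · subst hse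
          simp [pvG, pvOptRev, hT]
        · have hss : PySem.Str.strip s ≠ "" := fun hn => hse (hs.mp hn)
          simp [pvG, hse, hb, pvOptRev, hT]

theorem pv_join_nil : PySem.Str.join "\n" ([] : List String) = "" := rfl

-- ===== VERDICT (by name: the statement is the Claim_ definition above) =====
theorem extract_entry_body_spec : Claim_equal_extract_entry_body := by
  intro page_text term start_line_idx lines _ _
  unfold Spec_extract_entry_body
  simp only [extract_entry_body, extract_entry_body_alt]
  set tu := PySem.Str.upper term with htu
  set raw := PySem.List.pyGetD lines start_line_idx "" with hraw
  set idxs := PySem.List.pyRange (start_line_idx + 1) (lines.length : Int) 1 with hidxs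
  set strips := idxs.map (fun i => PySem.Str.strip (PySem.List.pyGetD lines i "")) with hstrips
  have hmem : ∀ s ∈ strips, (PySem.Str.strip s = "" ↔ s = "") := by
    intro s hsmem
    rw [hstrips] at hsmem
    obtain ⟨i, _, rfl⟩ := List.mem_map.mp hsmem
    exact pv_strip_strip_iff _
  have htail : (idxs.reverse).foldl (fun r i => pvb_step tu lines i r) none
      = pvOptRev (pv_trimC (strips.take (strips.findIdx (fun s => pv_breaks tu s)))) := by
    rw [← List.foldr_eq_foldl_reverse]
    calc idxs.foldr (fun i t => pvb_step tu lines i t) none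
        = strips.foldr (pvG tu) none := by
          rw [hstrips, List.foldr_map]
          simp only [pvb_step_eq]
      _ = pvOptRev (pv_trimC (strips.take (strips.findIdx (fun s => pv_breaks tu s)))) :=
          pv_foldr_g tu strips hmem
  rw [pv_body_loop_eq, pv_trim_eq_trimC, htail, ← hstrips]
  set T := pv_trimC (strips.take (strips.findIdx (fun s => pv_breaks tu s))) with hTdef
  by_cases hsw : PySem.Str.startswith (PySem.Str.upper (PySem.Str.strip raw)) tu = true
  · by_cases hr : pv_lstrip_punct (PySem.Str.slice (PySem.Str.strip raw) (some (PySem.Str.len tu)) none) = ""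
    · -- headword prefix contributes nothing
      simp only [pv_head_part, hsw, if_true, hr, List.nil_append, ne_eq,
        not_true_eq_false]
      by_cases hTe : T = []
      · simp only [pvOptRev, hTe, reduceIte]
        rw [← hTdef, hTe]
        exact pv_join_nil
      · simp only [pvOptRev, hTe, reduceIte, List.reverse_reverse]
        rw [← hTdef]
    · -- head is [remainder]
      have hnb := pv_head_remainder_not_blank raw (PySem.Str.len tu) hr
      simp only [pv_head_part, hsw, if_true, hr, ite_false, List.singleton_append, ne_eq,
        not_false_eq_true, pv_trimC_cons, ← hTdef, hnb]
      by_cases hTe : T = []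
      · simp [pvOptRev, hTe, pv_join_singleton]
      · simp [pvOptRev, hTe, List.reverse_append, List.reverse_reverse]
  · simp only [pv_head_part, hsw, if_false, List.nil_append, Bool.false_eq_true]
    by_cases hTe : T = []
    · simp only [pvOptRev, hTe, reduceIte]
      rw [← hTdef, hTe]
      exact pv_join_nil
    · simp only [pvOptRev, hTe, reduceIte, List.reverse_reverse]
      rw [← hTdef]
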